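-- pv_equiv track=rewrite | github.com/Fondamenti18/fondamenti-di-programmazione | students/1806064/homework03/program02.py | destra
-- ===== SOURCE A (Python) =====
-- def colora_quad(output,y,x,c):
--     for j in range(y,y+40):
--         for i in range(x,x+40):
--             output[j][i]=c
--     return output
--
-- def destra(y,x,matrice,larghezza):
--     contapassi=""
--     x+=40
--     while x<larghezza:
--         valore=matrice[y][x]
--         if valore!=(255,0,0) and valore!=(0,255,0):
--             matrice=colora_quad(matrice,y,x,(0,255,0))
--             contapassi+="0"
--             x+=40
--         else:
--             return y,x-40,matrice,contapassi
--     x-=40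
--     return y,x,matrice,contapassi
-- ===== SOURCE B (Python) =====
-- def colora_quad(output,y,x,c):
--     for j in range(y,y+40):
--         for i in range(x,x+40):
--             output[j][i]=c
--     return output
--
-- def destra(y,x,matrice,larghezza):
--     cols=[]
--     cx=x+40
--     while cx<larghezza:
--         valore=matrice[y][cx]
--         if valore==(255,0,0) or valore==(0,255,0):
--             break
--         cols.append(cx)
--         cx+=40
--     for col in cols:
--         matrice=colora_quad(matrice,y,col,(0,255,0))
--     return y,cx-40,matrice,"0"*len(cols)
-- ===== Notes on version B (the rewrite author's own statement) =====
-- stated objective: alternative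
-- what changed: destra is decomposed into a read-only scan that collects the clear block start columns and the final column, followed by a separate paint pass over the collected columns, with contapassi produced as '0'*len(cols) instead of string accumulation inside the paint-while-scanning loop; …
import Mathlib
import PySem

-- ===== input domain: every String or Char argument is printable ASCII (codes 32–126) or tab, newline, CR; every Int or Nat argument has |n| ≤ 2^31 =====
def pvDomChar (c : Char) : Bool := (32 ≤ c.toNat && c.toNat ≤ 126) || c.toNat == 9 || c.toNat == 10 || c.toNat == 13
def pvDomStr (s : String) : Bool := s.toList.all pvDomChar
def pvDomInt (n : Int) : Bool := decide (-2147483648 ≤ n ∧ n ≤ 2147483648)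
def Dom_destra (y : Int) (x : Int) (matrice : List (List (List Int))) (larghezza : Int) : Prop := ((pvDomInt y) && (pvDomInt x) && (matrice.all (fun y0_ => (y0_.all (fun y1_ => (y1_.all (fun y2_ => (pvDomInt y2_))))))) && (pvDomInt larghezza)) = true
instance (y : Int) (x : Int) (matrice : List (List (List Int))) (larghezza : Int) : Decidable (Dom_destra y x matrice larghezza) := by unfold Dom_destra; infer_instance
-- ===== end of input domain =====

-- B defers the green painting to a second pass after a read-only scan of the clear block columns;
-- same cost as A, return value proved equal on Pre_. Both Pythons mutate `matrice` in place the same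
-- way (the same colora_quad calls); the theorems here are about the returned value.

-- ===== PORT A =====
def pvRed : List Int := [255, 0, 0]
def pvGreen : List Int := [0, 255, 0]

-- matrice[y][x] : `none` exactly where Python raises IndexError
def pvCell (m : List (List (List Int))) (y x : Int) : Option (List Int) :=
  match PySem.List.pyGet? m y with
  | none => none
  | some row => PySem.List.pyGet? row x

-- output[j][i] = c : fetch row j, set column i (on an index Python would raise at, Pre_ excludes
-- the input and the port leaves the matrix unchanged)
def pvAssign (out : List (List (List Int))) (j i : Int) (c : List Int) : List (List (List Int)) :=
  match PySem.List.pyGet? out j with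
  | none => out
  | some row => PySem.List.pySetD out j (PySem.List.pySetD row i c)

def colora_quad (output : List (List (List Int))) (y x : Int) (c : List Int) : List (List (List Int)) :=
  (PySem.List.pyRange y (y + 40) 1).foldl (fun out j =>
    (PySem.List.pyRange x (x + 40) 1).foldl (fun out2 i => pvAssign out2 j i c) out) output

-- A's while loop; both return statements produce current x - 40
def destraLoop (y larghezza : Int) (matrice : List (List (List Int))) (x : Int)
    (contapassi : String) : Int × Int × List (List (List Int)) × String :=
  if x < larghezza then
    match pvCell matrice y x with
    | none => (y, x - 40, matrice, contapassi)  -- Python raises IndexError here; excluded by Pre_destra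
    | some valore =>
      if valore ≠ pvRed ∧ valore ≠ pvGreen then
        destraLoop y larghezza (colora_quad matrice y x pvGreen) (x + 40) (contapassi ++ "0")
      else
        (y, x - 40, matrice, contapassi)
  else (y, x - 40, matrice, contapassi)
termination_by (larghezza - x).toNat
decreasing_by simp_wf; omega

def destra (y : Int) (x : Int) (matrice : List (List (List Int))) (larghezza : Int) :
    Int × Int × List (List (List Int)) × String :=
  destraLoop y larghezza matrice (x + 40) ""

-- ===== PORT B =====
-- read-only scan: clear block columns and the final column cx
def scanClear (y larghezza : Int) (matrice : List (List (List Int))) (x : Int) :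
    List Int × Int :=
  if x < larghezza then
    match pvCell matrice y x with
    | none => ([], x)  -- Python raises IndexError here; excluded by Pre_destra
    | some valore =>
      if valore = pvRed ∨ valore = pvGreen then ([], x)
      else
        let r := scanClear y larghezza matrice (x + 40)
        (x :: r.1, r.2)
  else ([], x)
termination_by (larghezza - x).toNat
decreasing_by simp_wf; omega

def destra_alt (y : Int) (x : Int) (matrice : List (List (List Int))) (larghezza : Int) :
    Int × Int × List (List (List Int)) × String :=
  let r := scanClear y larghezza matrice (x + 40)
  (y, r.2 - 40,
   r.1.foldl (fun m col => colora_quad m y col pvGreen) matrice,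
   String.ofList (List.replicate r.1.length '0'))

-- ===== PRECONDITION & SPEC =====
-- Pre_ admits every input whose loop never runs (larghezza ≤ x+40: A returns at once, touching nothing),
-- and otherwise requires a well-formed 40-aligned image so that A's reads matrice[y][x] and its 40x40
-- colora_quad paints never raise IndexError; this also excludes some ragged or misaligned matrices on
-- which A happens to return (e.g. blocked before any paint) — see the claim's cites.
def Pre_destra (y : Int) (x : Int) (matrice : List (List (List Int))) (larghezza : Int) : Prop :=
  larghezza ≤ x + 40 ∨
  (0 ≤ y ∧ y + 40 ≤ (matrice.length : Int) ∧ 0 ≤ x ∧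
   (∀ row ∈ matrice, (row.length : Int) = larghezza) ∧ (40 : Int) ∣ larghezza ∧ (40 : Int) ∣ x)
instance (y : Int) (x : Int) (matrice : List (List (List Int))) (larghezza : Int) : Decidable (Pre_destra y x matrice larghezza) := by unfold Pre_destra; infer_instance

def pvWitness_destra : Int × Int × List (List (List Int)) × Int := (0, 0, [], 0)

def Spec_destra (y : Int) (x : Int) (matrice : List (List (List Int))) (larghezza : Int) (out : Int × Int × List (List (List Int)) × String) : Prop := out = destra_alt y x matrice larghezza
instance (y : Int) (x : Int) (matrice : List (List (List Int))) (larghezza : Int) (out : Int × Int × List (List (List Int)) × String) : Decidable (Spec_destra y x matrice larghezza out) := by unfold Spec_destra; infer_instance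

-- ===== CLAIM (what is proved, stated in full; the proofs are below) =====
def Claim_equal_destra : Prop := ∀ (y : Int) (x : Int) (matrice : List (List (List Int))) (larghezza : Int), Dom_destra y x matrice larghezza → Pre_destra y x matrice larghezza → Spec_destra y x matrice larghezza (destra y x matrice larghezza)

-- ===== LEMMAS AND PROOFS =====

-- a fold step that preserves an observation preserves it over the whole fold
theorem pv_foldl_preserves {α β γ : Type} (P : α → γ) (f : α → β → α) :
    ∀ (l : List β) (s : α), (∀ b ∈ l, ∀ t, P (f t b) = P t) → P (l.foldl f s) = P s := by
  intro l
  induction l with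
  | nil => intro s _; rfl
  | cons b bs ih =>
    intro s h
    rw [List.foldl_cons, ih (f s b) (fun b' hb' => h b' (List.mem_cons_of_mem _ hb')),
        h b (List.mem_cons_self) s]

-- a single Python assignment output[j][i] = c does not change the cell read at (y, x')
-- when 0 ≤ i < x' (column strictly left of the read) and all indices are nonnegative
theorem pv_cell_assign (out : List (List (List Int))) (y j i x' : Int) (c : List Int)
    (hy : 0 ≤ y) (hj : 0 ≤ j) (hi : 0 ≤ i) (hix : i < x') :
    pvCell (pvAssign out j i c) y x' = pvCell out y x' := by
  have hx' : (0 : Int) ≤ x' := by omega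
  cases hget : PySem.List.pyGet? out j with
  | none => simp [pvAssign, hget]
  | some row =>
    have hget' := hget
    rw [PySem.List.pyGet?_of_nonneg out hj] at hget'
    obtain ⟨hjlen, hrow⟩ := List.getElem?_eq_some_iff.mp hget'
    simp only [pvAssign, hget]
    unfold pvCell
    rw [PySem.List.pySetD_of_nonneg (i := j) (h := hj),
        PySem.List.pySetD_of_nonneg (i := i) (h := hi),
        PySem.List.pyGet?_of_nonneg _ hy, PySem.List.pyGet?_of_nonneg _ hy,
        List.getElem?_set]
    by_cases hje : j.toNat = y.toNat
    · have hyget : out[y.toNat]? = some row := by rw [← hje]; exact hget'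
      rw [if_pos hje, if_pos hjlen, hyget]
      show PySem.List.pyGet? (row.set i.toNat c) x' = PySem.List.pyGet? row x'
      rw [PySem.List.pyGet?_of_nonneg _ hx', PySem.List.pyGet?_of_nonneg _ hx',
          List.getElem?_set, if_neg (by omega)]
    · rw [if_neg hje]

theorem pv_scan_stop (y larghezza : Int) (m : List (List (List Int))) (x : Int)
    (h : larghezza ≤ x) : scanClear y larghezza m x = ([], x) := by
  rw [scanClear, if_neg (by omega)]

theorem pv_loop_stop (y larghezza : Int) (m : List (List (List Int))) (x : Int) (conta : String)
    (h : larghezza ≤ x) : destraLoop y larghezza m x conta = (y, x - 40, m, conta) := by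
  rw [destraLoop, if_neg (by omega)]

theorem pv_append_zero (s : String) (l : List Char) :
    (s ++ "0") ++ String.ofList l = s ++ String.ofList ('0' :: l) := by
  rw [String.append_assoc, show ('0' :: l) = ['0'] ++ l from rfl, String.ofList_append]

-- painting a 40x40 block whose columns lie strictly left of x' does not change the cell (y, x')
theorem pv_cell_paint (m : List (List (List Int))) (y col x' : Int) (c : List Int)
    (hy : 0 ≤ y) (hcol : 0 ≤ col) (hx : col + 40 ≤ x') :
    pvCell (colora_quad m y col c) y x' = pvCell m y x' := by
  unfold colora_quad
  apply pv_foldl_preserves (fun m => pvCell m y x')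
  intro j hj out
  apply pv_foldl_preserves (fun m => pvCell m y x')
  intro i hi out2
  rw [PySem.List.mem_pyRange_one] at hj hi
  exact pv_cell_assign out2 y j i x' c hy (by omega) (by omega) (by omega)

-- the read-only scan sees the same values through a paint at an earlier column
theorem pv_scan_paint (y larghezza col : Int) (c : List Int) (hy : 0 ≤ y) (hcol : 0 ≤ col) :
    ∀ (n : Nat) (m : List (List (List Int))) (x : Int), (larghezza - x).toNat ≤ n →
      col + 40 ≤ x →
      scanClear y larghezza (colora_quad m y col c) x = scanClear y larghezza m x := by
  intro n
  induction n with
  | zero =>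
    intro m x hn hx
    rw [pv_scan_stop _ _ _ _ (by omega), pv_scan_stop _ _ _ _ (by omega)]
  | succ k ih =>
    intro m x hn hx
    rw [scanClear]
    conv_rhs => rw [scanClear]
    by_cases hlt : x < larghezza
    · rw [if_pos hlt, if_pos hlt, pv_cell_paint m y col x c hy hcol hx]
      cases pvCell m y x with
      | none => rfl
      | some v =>
        simp only
        by_cases hv : v = pvRed ∨ v = pvGreen
        · rw [if_pos hv, if_pos hv]
        · rw [if_neg hv, if_neg hv, ih m (x + 40) (by omega) (by omega)]
    · rw [if_neg hlt, if_neg hlt]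

-- the main invariant: A's paint-as-you-go loop equals B's scan + deferred paint + replicate
theorem pv_loop_eq (y larghezza : Int) (hy : 0 ≤ y) :
    ∀ (n : Nat) (m : List (List (List Int))) (x : Int) (conta : String),
      (larghezza - x).toNat ≤ n → 0 ≤ x →
      destraLoop y larghezza m x conta =
        (y, (scanClear y larghezza m x).2 - 40,
         (scanClear y larghezza m x).1.foldl (fun m col => colora_quad m y col pvGreen) m,
         conta ++ String.ofList (List.replicate (scanClear y larghezza m x).1.length '0')) := by
  intro n
  induction n with
  | zero =>
    intro m x conta hn hx
    rw [pv_loop_stop _ _ _ _ _ (by omega), pv_scan_stop _ _ _ _ (by omega)]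
    simp
  | succ k ih =>
    intro m x conta hn hx
    by_cases hlt : x < larghezza
    · rw [destraLoop, if_pos hlt]
      conv_rhs => rw [scanClear, if_pos hlt]
      cases hc : pvCell m y x with
      | none => simp
      | some v =>
        simp only
        by_cases hv : v = pvRed ∨ v = pvGreen
        · rw [if_neg (by tauto), if_pos hv]
          simp
        · rw [if_pos (by tauto), if_neg hv]
          rw [ih (colora_quad m y x pvGreen) (x + 40) (conta ++ "0") (by omega) (by omega),
              pv_scan_paint y larghezza x pvGreen hy hx k m (x + 40) (by omega) (by omega)]
          simp only [List.foldl_cons, List.length_cons, List.replicate_succ]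
          rw [pv_append_zero]
    · rw [pv_loop_stop _ _ _ _ _ (by omega), pv_scan_stop _ _ _ _ (by omega)]
      simp

-- ===== VERDICT (by name: the statement is the Claim_ definition above) =====
theorem destra_spec : Claim_equal_destra := by
  intro y x matrice larghezza _ hpre
  unfold Spec_destra destra destra_alt
  rcases hpre with hpre | ⟨hy, _, hx, _, _, _⟩
  · rw [pv_loop_stop _ _ _ _ _ (by omega), pv_scan_stop _ _ _ _ (by omega)]
    simp
  · rw [pv_loop_eq y larghezza hy ((larghezza - (x + 40)).toNat) matrice (x + 40) ""
        (le_refl _) (by omega)]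
    simp
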